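-- pv_equiv track=rewrite | github.com/MassilAit/BNN | XOR4/read_tb_dc.py | apply_perm_key
-- ===== SOURCE A (Python) =====
-- def apply_perm_key(key: int, row_map) -> int:
--     care, value = key >> 16, key & 0xFFFF
--     new_care = new_value = 0
--     for old, new in enumerate(row_map):
--         if (care >> old) & 1:
--             new_care  |= 1 << new
--             if (value >> old) & 1:
--                 new_value |= 1 << new
--     return (new_care << 16) | new_value
-- ===== SOURCE B (Python) =====
-- def _permute(bits, row_map):
--     out = 0
--     for old, new in enumerate(row_map):
--         if (bits >> old) & 1:
--             out |= 1 << new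
--     return out
--
--
-- def apply_perm_key(key: int, row_map) -> int:
--     care = key >> 16
--     masked = (key & 0xFFFF) & care
--     return (_permute(care, row_map) << 16) | _permute(masked, row_map)
-- ===== Notes on version B (the rewrite author's own statement) =====
-- stated objective: alternative
-- what changed: Replaces A's single loop with a nested care/value conditional by one upfront value & care mask and a reusable single-test permute(bits, row_map) helper applied independently to the care bits and to the masked value bits.
import Mathlib
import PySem

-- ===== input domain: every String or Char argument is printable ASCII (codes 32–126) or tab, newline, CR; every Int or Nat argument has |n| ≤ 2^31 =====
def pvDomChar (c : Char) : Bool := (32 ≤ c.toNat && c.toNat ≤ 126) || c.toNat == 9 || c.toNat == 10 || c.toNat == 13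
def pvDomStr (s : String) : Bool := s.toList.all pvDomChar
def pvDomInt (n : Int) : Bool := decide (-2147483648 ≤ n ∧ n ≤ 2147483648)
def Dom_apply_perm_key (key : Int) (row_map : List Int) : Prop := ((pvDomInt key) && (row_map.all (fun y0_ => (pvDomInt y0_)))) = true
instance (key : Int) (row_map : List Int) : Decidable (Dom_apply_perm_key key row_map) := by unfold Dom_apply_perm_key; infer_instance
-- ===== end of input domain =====

-- B replaces A's single loop with a nested care/value conditional by one upfront
-- value & care mask and two independent single-test permutation passes (same cost).


-- ===== PORT A =====
-- 'old' is an enumerate index (always ≥ 0), so '.toNat' on it is exact; 'new' is a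
-- row_map entry: Pre_ below requires 0 ≤ new whenever its shift '1 << new' is reached,
-- so '.toNat' on it is exact on Pre_ (Python raises ValueError on a negative shift).
def apply_perm_key (key : Int) (row_map : List Int) : Int :=
  let care := key >>> 16
  let value := PySem.Int.band key 65535
  let st := (PySem.List.enumerate row_map 0).foldl
    (fun (st : Int × Int) (p : Int × Int) =>
      if PySem.Int.band (care >>> p.1.toNat) 1 ≠ 0 then
        (PySem.Int.bor st.1 ((1 : Int) <<< p.2.toNat),
         if PySem.Int.band (value >>> p.1.toNat) 1 ≠ 0 then
           PySem.Int.bor st.2 ((1 : Int) <<< p.2.toNat)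
         else st.2)
      else st) ((0 : Int), (0 : Int))
  PySem.Int.bor (st.1 <<< 16) st.2

-- ===== PORT B =====
def permuteBits (bits : Int) (row_map : List Int) : Int :=
  (PySem.List.enumerate row_map 0).foldl
    (fun (out : Int) (p : Int × Int) =>
      if PySem.Int.band (bits >>> p.1.toNat) 1 ≠ 0 then
        PySem.Int.bor out ((1 : Int) <<< p.2.toNat)
      else out) 0

def apply_perm_key_alt (key : Int) (row_map : List Int) : Int :=
  let care := key >>> 16
  let masked := PySem.Int.band (PySem.Int.band key 65535) care
  PySem.Int.bor ((permuteBits care row_map) <<< 16) (permuteBits masked row_map)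

-- ===== PRECONDITION & SPEC =====
-- Pre_ excludes exactly the inputs where the Python raises ValueError: a negative
-- row_map entry whose position has the corresponding care bit set ('1 << new' with
-- new < 0); both A and B raise there.
def Pre_apply_perm_key (key : Int) (row_map : List Int) : Prop :=
  ∀ p ∈ PySem.List.enumerate row_map 0,
    PySem.Int.band ((key >>> 16) >>> p.1.toNat) 1 ≠ 0 → 0 ≤ p.2
instance (key : Int) (row_map : List Int) : Decidable (Pre_apply_perm_key key row_map) := by
  unfold Pre_apply_perm_key; infer_instance

def pvWitness_apply_perm_key : Int × List Int := (196611, [1, 0])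

def Spec_apply_perm_key (key : Int) (row_map : List Int) (out : Int) : Prop := out = apply_perm_key_alt key row_map
instance (key : Int) (row_map : List Int) (out : Int) : Decidable (Spec_apply_perm_key key row_map out) := by unfold Spec_apply_perm_key; infer_instance

-- ===== CLAIM (what is proved, stated in full; the proofs are below) =====
def Claim_equal_apply_perm_key : Prop := ∀ (key : Int) (row_map : List Int), Dom_apply_perm_key key row_map → Pre_apply_perm_key key row_map → Spec_apply_perm_key key row_map (apply_perm_key key row_map)

-- ===== LEMMAS AND PROOFS =====

theorem pv_and_add_ldiff (m n : Nat) : m.ldiff n + (m &&& n) = m := by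
  induction m using Nat.binaryRec generalizing n with
  | zero => simp [Nat.ldiff]
  | bit b m ih =>
      have h := ih (n >>> 1)
      rw [← Nat.bit_testBit_zero_shiftRight_one n, Nat.ldiff_bit, Nat.land_bit]
      simp only [Nat.bit]
      rcases b <;> rcases n.testBit 0 <;> simp <;> omega

theorem pv_sub_and (m n : Nat) : m - (m &&& n) = m.ldiff n := by
  have := pv_and_add_ldiff m n; omega

theorem pv_band_natCast_one (a : Nat) : PySem.Int.band (a : Int) 1 = ((a % 2 : Nat) : Int) := by
  have h : (1 : Int) = ((1 : Nat) : Int) := rfl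
  rw [h, PySem.Int.band_natCast, Nat.and_one_is_mod]

theorem pv_band_negSucc_one (x : Nat) :
    PySem.Int.band (Int.negSucc x) 1 = ((1 - x % 2 : Nat) : Int) := by
  have h0 : ¬ (0 : Int) ≤ Int.negSucc x := by omega
  simp only [PySem.Int.band, h0, if_false, if_true, zero_le_one]
  norm_num [Int.negSucc_eq, Nat.one_and_eq_mod_two]

theorem pv_bit_cast (v k : Nat) :
    PySem.Int.band ((v : Int) >>> k) 1 = if v.testBit k then 1 else 0 := by
  have h1 : ((v : Int) >>> k) = ((v >>> k : Nat) : Int) := by simp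
  rw [h1, pv_band_natCast_one, Nat.shiftRight_eq_div_pow, Nat.testBit_eq_decide_div_mod_eq]
  rcases Nat.mod_two_eq_zero_or_one (v / 2 ^ k) with h | h <;> rw [h] <;> norm_num

theorem pv_bit_negSucc (m k : Nat) :
    PySem.Int.band ((Int.negSucc m) >>> k) 1 = if m.testBit k then 0 else 1 := by
  have h2 : (Int.negSucc m) >>> k = Int.negSucc (m >>> k) := by
    simp [Int.shiftRight_eq, Int.shiftRight]
  rw [h2, pv_band_negSucc_one, Nat.shiftRight_eq_div_pow, Nat.testBit_eq_decide_div_mod_eq]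
  rcases Nat.mod_two_eq_zero_or_one (m / 2 ^ k) with h | h <;> rw [h] <;> norm_num

-- bit k of (a & b) is the product of bit k of a and bit k of b
theorem pv_band_cast_cast (m n : Nat) :
    PySem.Int.band (m : Int) (n : Int) = ((m &&& n : Nat) : Int) := by
  simp [PySem.Int.band]

theorem pv_band_cast_negSucc (m n : Nat) :
    PySem.Int.band (m : Int) (Int.negSucc n) = ((m.ldiff n : Nat) : Int) := by
  have h0 : ¬ (0 : Int) ≤ Int.negSucc n := by omega
  simp only [PySem.Int.band]
  rw [if_pos (Int.natCast_nonneg m), if_neg h0]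
  have e : (-(Int.negSucc n) - 1) = (n : Int) := by omega
  rw [e]
  simp [pv_sub_and]

theorem pv_band_negSucc_cast (m n : Nat) :
    PySem.Int.band (Int.negSucc m) (n : Int) = ((n.ldiff m : Nat) : Int) := by
  have h0 : ¬ (0 : Int) ≤ Int.negSucc m := by omega
  simp only [PySem.Int.band]
  rw [if_neg h0, if_pos (Int.natCast_nonneg n)]
  have e : (-(Int.negSucc m) - 1) = (m : Int) := by omega
  rw [e]
  simp [pv_sub_and]

theorem pv_band_negSucc_negSucc (m n : Nat) :
    PySem.Int.band (Int.negSucc m) (Int.negSucc n) = Int.negSucc (m ||| n) := by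
  have h0 : ¬ (0 : Int) ≤ Int.negSucc m := by omega
  have h1 : ¬ (0 : Int) ≤ Int.negSucc n := by omega
  simp only [PySem.Int.band]
  rw [if_neg h0, if_neg h1]
  have em : (-(Int.negSucc m) - 1) = (m : Int) := by omega
  have en : (-(Int.negSucc n) - 1) = (n : Int) := by omega
  rw [em, en]
  simp only [Int.toNat_natCast]
  omega

-- bit k of (a & b) is the product of bit k of a and bit k of b
theorem pv_bit_band (a b : Int) (k : Nat) :
    PySem.Int.band (PySem.Int.band a b >>> k) 1
      = PySem.Int.band (a >>> k) 1 * PySem.Int.band (b >>> k) 1 := by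
  rcases a with m | m <;> rcases b with n | n <;>
    try simp only [Int.ofNat_eq_natCast]
  · rw [pv_band_cast_cast, pv_bit_cast, pv_bit_cast, pv_bit_cast, Nat.testBit_land]
    rcases m.testBit k <;> rcases n.testBit k <;> norm_num
  · rw [pv_band_cast_negSucc, pv_bit_cast, pv_bit_cast, pv_bit_negSucc, Nat.testBit_ldiff]
    rcases m.testBit k <;> rcases n.testBit k <;> norm_num
  · rw [pv_band_negSucc_cast, pv_bit_cast, pv_bit_negSucc, pv_bit_cast, Nat.testBit_ldiff]
    rcases m.testBit k <;> rcases n.testBit k <;> norm_num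
  · rw [pv_band_negSucc_negSucc, pv_bit_negSucc, pv_bit_negSucc, pv_bit_negSucc, Nat.testBit_lor]
    rcases m.testBit k <;> rcases n.testBit k <;> norm_num

theorem pv_bit01 (x : Int) (k : Nat) :
    PySem.Int.band (x >>> k) 1 = 0 ∨ PySem.Int.band (x >>> k) 1 = 1 := by
  rcases x with m | m
  · simp only [Int.ofNat_eq_natCast]
    rw [pv_bit_cast]
    rcases m.testBit k <;> norm_num
  · rw [pv_bit_negSucc]
    rcases m.testBit k <;> norm_num

-- A's combined loop = B's two independent permutation passes
theorem pv_loop_eq (care value : Int) (l : List (Int × Int)) (nc nv : Int) :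
    l.foldl
      (fun (st : Int × Int) (p : Int × Int) =>
        if PySem.Int.band (care >>> p.1.toNat) 1 ≠ 0 then
          (PySem.Int.bor st.1 ((1 : Int) <<< p.2.toNat),
           if PySem.Int.band (value >>> p.1.toNat) 1 ≠ 0 then
             PySem.Int.bor st.2 ((1 : Int) <<< p.2.toNat)
           else st.2)
        else st) (nc, nv)
    = (l.foldl
        (fun (out : Int) (p : Int × Int) =>
          if PySem.Int.band (care >>> p.1.toNat) 1 ≠ 0 then
            PySem.Int.bor out ((1 : Int) <<< p.2.toNat)
          else out) nc,
       l.foldl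
        (fun (out : Int) (p : Int × Int) =>
          if PySem.Int.band (PySem.Int.band value care >>> p.1.toNat) 1 ≠ 0 then
            PySem.Int.bor out ((1 : Int) <<< p.2.toNat)
          else out) nv) := by
  induction l generalizing nc nv with
  | nil => rfl
  | cons p l ih =>
      simp only [List.foldl_cons]
      have hm := pv_bit_band value care p.1.toNat
      by_cases hc : PySem.Int.band (care >>> p.1.toNat) 1 = 0
      · have hm0 : PySem.Int.band (PySem.Int.band value care >>> p.1.toNat) 1 = 0 := by
          rw [hm, hc, mul_zero]
        rw [if_neg (by simpa using hc), if_neg (by simpa using hc),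
            if_neg (by simpa using hm0), ih]
      · by_cases hv : PySem.Int.band (value >>> p.1.toNat) 1 = 0
        · have hm0 : PySem.Int.band (PySem.Int.band value care >>> p.1.toNat) 1 = 0 := by
            rw [hm, hv, zero_mul]
          rw [if_pos hc, if_neg (by simpa using hv), if_pos hc,
              if_neg (by simpa using hm0), ih]
        · have hm1 : PySem.Int.band (PySem.Int.band value care >>> p.1.toNat) 1 ≠ 0 := by
            rw [hm]
            rcases pv_bit01 value p.1.toNat with h | h
            · exact absurd h hv
            rcases pv_bit01 care p.1.toNat with h' | h'
            · exact absurd h' hc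
            rw [h, h']; norm_num
          rw [if_pos hc, if_pos (by simpa using hv), if_pos hc, if_pos hm1, ih]

-- ===== VERDICT (by name: the statement is the Claim_ definition above) =====
theorem apply_perm_key_spec : Claim_equal_apply_perm_key := by
  intro key row_map _ _
  unfold Spec_apply_perm_key apply_perm_key apply_perm_key_alt permuteBits
  simp only []
  rw [pv_loop_eq (key >>> 16) (PySem.Int.band key 65535) (PySem.List.enumerate row_map 0) 0 0]
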